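-- pv_equiv track=rewrite | github.com/ntnquang2906/Invoice_broker_breakdown | broker-extraction-api/app/utils.py | get_currency_position
-- ===== SOURCE A (Python) =====
-- currencies = [
--     "AED", "AFN", "ALL", "AMD", "ANG", "AOA", "ARS", "AUD", "AWG", "AZN",
--     "BAM", "BBD", "BDT", "BGN", "BHD", "BIF", "BMD", "BND", "BOB", "BRL",
--     "BSD", "BTN", "BWP", "BYN", "BZD",
--     "CAD", "CDF", "CHF", "CLP", "CNY", "COP", "CRC", "CUP", "CVE", "CZK",
--     "DJF", "DKK", "DOP", "DZD",
--     "EGP", "ERN", "ETB", "EUR",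
--     "FJD", "FKP",
--     "GBP", "GEL", "GHS", "GIP", "GMD", "GNF", "GTQ", "GYD",
--     "HKD", "HNL", "HRK", "HTG", "HUF",
--     "IDR", "ILS", "INR", "IQD", "IRR", "ISK",
--     "JMD", "JOD", "JPY",
--     "KES", "KGS", "KHR", "KMF", "KPW", "KRW", "KWD", "KYD", "KZT",
--     "LAK", "LBP", "LKR", "LRD", "LSL", "LYD",
--     "MAD", "MDL", "MGA", "MKD", "MMK", "MNT", "MOP", "MRU", "MUR", "MVR", "MWK", "MXN", "MYR", "MZN",
--     "NAD", "NGN", "NIO", "NOK", "NPR", "NZD",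
--     "OMR",
--     "PAB", "PEN", "PGK", "PHP", "PKR", "PLN", "PYG",
--     "QAR",
--     "RON", "RSD", "RUB", "RWF",
--     "SAR", "SBD", "SCR", "SDG", "SEK", "SGD", "SHP", "SLL", "SOS", "SRD", "SSP", "STN", "SVC", "SYP", "SZL",
--     "THB", "TJS", "TMT", "TND", "TOP", "TRY", "TTD", "TWD", "TZS",
--     "UAH", "UGX", "USD", "UYU", "UZS",
--     "VES", "VND", "VUV",
--     "WST",
--     "XAF", "XCD", "XOF", "XPF",
--     "YER",
--     "ZAR", "ZMW", "ZWL"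
-- ]
--
-- def get_currency_position(row_json):
--     for e in currencies:
--         if e in row_json.get("By investment category", []):
--             return e
--         for field in row_json:
--             for ele in row_json[field]:
--                 if e in ele:
--                     return e
--     return ""
-- ===== SOURCE B (Python) =====
-- # All currency codes as one space-separated string (split once at call time).
-- CURRENCY_CODES = "AED AFN ALL AMD ANG AOA ARS AUD AWG AZN BAM BBD BDT BGN BHD BIF BMD BND BOB BRL BSD BTN BWP BYN BZD CAD CDF CHF CLP CNY COP CRC CUP CVE CZK DJF DKK DOP DZD EGP ERN ETB EUR FJD FKP GBP GEL GHS GIP GMD GNF GTQ GYD HKD HNL HRK HTG HUF IDR ILS INR IQD IRR ISK JMD JOD JPY KES KGS KHR KMF KPW KRW KWD KYD KZT LAK LBP LKR LRD LSL LYD MAD MDL MGA MKD MMK MNT MOP MRU MUR MVR MWK MXN MYR MZN NAD NGN NIO NOK NPR NZD OMR PAB PEN PGK PHP PKR PLN PYG QAR RON RSD RUB RWF SAR SBD SCR SDG SEK SGD SHP SLL SOS SRD SSP STN SVC SYP SZL THB TJS TMT TND TOP TRY TTD TWD TZS UAH UGX USD UYU UZS VES VND VUV WST XAF XCD XOF XPF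 YER ZAR ZMW ZWL"
--
--
-- def get_currency_position(row_json):
--     # One pass over the data: list all 3-character substrings of every cell,
--     # union with the exact "By investment category" entries as a set,
--     # then return the first currency code present in that set.
--     subs = [ele[i:i + 3]
--             for field in row_json
--             for ele in row_json[field]
--             for i in range(len(ele) - 2)]
--     seen = set(subs) | set(row_json.get("By investment category", []))
--     for e in CURRENCY_CODES.split():
--         if e in seen:
--             return e
--     return ""
-- ===== Notes on version B (the rewrite author's own statement) =====
-- stated objective: faster
-- what changed: Instead of scanning every cell once per currency (156 substring scans over the whole row), B makes one pass listing all 3-character substrings of all cells, unions them as a set with the exact 'By investment category' entries, and returns the first code of a space-separated currency string (split once) found in that set.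
import Mathlib
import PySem

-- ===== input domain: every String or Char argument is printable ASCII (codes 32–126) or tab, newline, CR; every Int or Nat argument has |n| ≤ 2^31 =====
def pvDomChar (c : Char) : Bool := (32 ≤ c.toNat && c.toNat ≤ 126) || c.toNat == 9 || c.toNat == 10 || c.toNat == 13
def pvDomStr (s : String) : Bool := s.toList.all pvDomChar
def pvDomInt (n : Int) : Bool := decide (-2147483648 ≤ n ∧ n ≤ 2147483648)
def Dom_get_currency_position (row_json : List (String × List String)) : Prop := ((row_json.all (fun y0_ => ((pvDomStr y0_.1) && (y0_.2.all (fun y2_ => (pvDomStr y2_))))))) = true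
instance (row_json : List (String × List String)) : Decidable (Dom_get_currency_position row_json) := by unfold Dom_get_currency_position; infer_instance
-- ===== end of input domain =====

-- B replaces A's per-currency rescan of every cell by one pass that lists all 3-character
-- substrings of the cells, unions them as a set with the exact "By investment category"
-- entries, and returns the first currency code (taken from one space-separated string,
-- split once) present in that set.

-- ===== PORT A =====
-- A's module-level list 'currencies'
def pvCurrencies : List String := ["AED", "AFN", "ALL", "AMD", "ANG", "AOA", "ARS", "AUD", "AWG", "AZN", "BAM", "BBD", "BDT", "BGN", "BHD", "BIF", "BMD", "BND", "BOB", "BRL", "BSD", "BTN", "BWP", "BYN", "BZD", "CAD", "CDF", "CHF", "CLP", "CNY", "COP", "CRC", "CUP", "CVE", "CZK", "DJF", "DKK", "DOP", "DZD", "EGP", "ERN", "ETB", "EUR", "FJD", "FKP", "GBP", "GEL", "GHS", "GIP", "GMD", "GNF", "GTQ", "GYD", "HKD", "HNL", "HRK", "HTG", "HUF", "IDR", "ILS", "INR", "IQD", "IRR", "ISK", "JMD", "JOD", "JPY", "KES", "KGS", "KHR", "KMF", "KPW", "KRW", "KWD", "KYD", "KZT", "LAK", "LBP", "LKR", "LRD",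 "LSL", "LYD", "MAD", "MDL", "MGA", "MKD", "MMK", "MNT", "MOP", "MRU", "MUR", "MVR", "MWK", "MXN", "MYR", "MZN", "NAD", "NGN", "NIO", "NOK", "NPR", "NZD", "OMR", "PAB", "PEN", "PGK", "PHP", "PKR", "PLN", "PYG", "QAR", "RON", "RSD", "RUB", "RWF", "SAR", "SBD", "SCR", "SDG", "SEK", "SGD", "SHP", "SLL", "SOS", "SRD", "SSP", "STN", "SVC", "SYP", "SZL", "THB", "TJS", "TMT", "TND", "TOP", "TRY", "TTD", "TWD", "TZS", "UAH", "UGX", "USD", "UYU", "UZS", "VES", "VND", "VUV", "WST", "XAF", "XCD", "XOF", "XPF", "YER", "ZAR", "ZMW", "ZWL"]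

-- A's inner scan for one currency e: 'for field in row_json: for ele in row_json[field]: if e in ele: return e'
def pvACellHit (e : String) (row_json : List (String × List String)) : Bool :=
  row_json.any (fun field =>
    (PySem.Dict.getD (PySem.Dict.mk row_json) field.1 []).any (fun ele => PySem.Str.isIn e ele))

-- A's outer loop 'for e in currencies: …'
def pvALoop (row_json : List (String × List String)) : List String → String
  | [] => ""
  | e :: rest =>
    if (PySem.Dict.getD (PySem.Dict.mk row_json) "By investment category" []).contains e then e
    else if pvACellHit e row_json then e
    else pvALoop row_json rest

def get_currency_position (row_json : List (String × List String)) : String :=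
  pvALoop row_json pvCurrencies

-- ===== PORT B =====
-- B's module-level constant CURRENCY_CODES (one space-separated string)
def pvCurrencyCodes : String := "AED AFN ALL AMD ANG AOA ARS AUD AWG AZN BAM BBD BDT BGN BHD BIF BMD BND BOB BRL BSD BTN BWP BYN BZD CAD CDF CHF CLP CNY COP CRC CUP CVE CZK DJF DKK DOP DZD EGP ERN ETB EUR FJD FKP GBP GEL GHS GIP GMD GNF GTQ GYD HKD HNL HRK HTG HUF IDR ILS INR IQD IRR ISK JMD JOD JPY KES KGS KHR KMF KPW KRW KWD KYD KZT LAK LBP LKR LRD LSL LYD MAD MDL MGA MKD MMK MNT MOP MRU MUR MVR MWK MXN MYR MZN NAD NGN NIO NOK NPR NZD OMR PAB PEN PGK PHP PKR PLN PYG QAR RON RSD RUB RWF SAR SBD SCR SDG SEK SGD SHP SLL SOS SRD SSP STN SVC SYP SZL THB TJS TMT TND TOP TRY TTD TWD TZS UAH UGX USD UYU UZS VES VND VUV WST XAF XCD XOF XPF YER ZAR ZMW ZWL"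

-- B's comprehension: [ele[i:i+3] for field in row_json for ele in row_json[field] for i in range(len(ele)-2)]
def pvSubs (row_json : List (String × List String)) : List String :=
  row_json.flatMap (fun field =>
    (PySem.Dict.getD (PySem.Dict.mk row_json) field.1 []).flatMap (fun ele =>
      (PySem.List.pyRange 0 (PySem.Str.len ele - 2) 1).map (fun i =>
        PySem.Str.slice ele (some i) (some (i + 3)))))

-- B's 'seen = set(subs) | set(row_json.get("By investment category", []))'
def pvSeenB (row_json : List (String × List String)) : PySem.Set String :=
  PySem.Set.union (PySem.Set.ofList (pvSubs row_json))
    (PySem.Set.ofList (PySem.Dict.getD (PySem.Dict.mk row_json) "By investment category" []))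

-- B's final loop 'for e in CURRENCY_CODES.split(): if e in seen: return e' / 'return ""'
def get_currency_position_alt (row_json : List (String × List String)) : String :=
  ((PySem.Str.split₀ pvCurrencyCodes).find?
      (fun e => PySem.Set.contains (pvSeenB row_json) e)).getD ""

-- ===== PRECONDITION & SPEC =====
def Spec_get_currency_position (row_json : List (String × List String)) (out : String) : Prop := out = get_currency_position_alt row_json
instance (row_json : List (String × List String)) (out : String) : Decidable (Spec_get_currency_position row_json out) := by unfold Spec_get_currency_position; infer_instance

-- ===== CLAIM (what is proved, stated in full; the proofs are below) =====
def Claim_equal_get_currency_position : Prop := ∀ (row_json : List (String × List String)), Dom_get_currency_position row_json → Spec_get_currency_position row_json (get_currency_position row_json)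

-- ===== LEMMAS AND PROOFS =====

-- B's space-separated constant splits into exactly A's currency list
set_option maxRecDepth 8192 in
set_option maxHeartbeats 2000000 in
theorem pv_split_codes : PySem.Str.split₀ pvCurrencyCodes = pvCurrencies := by decide

set_option maxRecDepth 4096 in
theorem pv_cur_len : ∀ e ∈ pvCurrencies, e.toList.length = 3 := by decide

-- a 3-character pattern is a substring of ele iff it is one of ele's 3-character slices
theorem pv_isIn_iff_slice (e ele : String) (h3 : e.toList.length = 3) :
    PySem.Str.isIn e ele = true ↔
      ∃ i ∈ PySem.List.pyRange 0 (PySem.Str.len ele - 2) 1,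
        e = PySem.Str.slice ele (some i) (some (i + 3)) := by
  rw [PySem.Str.isIn_eq, ← PySem.Chars.exists_prefix_drop_iff_isIn]
  constructor
  · rintro ⟨j, t, ht⟩
    have hlen : j + 3 ≤ ele.toList.length := by
      have hL : ele.toList.length = ele.length := String.length_toList
      have := congrArg List.length ht
      simp [h3] at this
      omega
    refine ⟨(j : Int), ?_, ?_⟩
    · rw [PySem.List.mem_pyRange_one, PySem.Str.len_eq]
      constructor
      · positivity
      · omega
    · apply String.toList_inj.mp
      have hsl : (PySem.Str.slice ele (some (j:Int)) (some ((j:Int) + 3))).toList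
          = PySem.List.slice ele.toList (some (j:Int)) (some ((j:Int) + 3)) := by
        simp [PySem.Str.slice]
      have h33 : ((j:Int) + 3) = ((j:Int) + ((3:Nat):Int)) := by push_cast; ring
      rw [hsl, h33, PySem.List.slice_natCast_add, ← ht, ← h3]
      exact List.take_left.symm
  · rintro ⟨i, hi, he⟩
    rw [PySem.List.mem_pyRange_one, PySem.Str.len_eq] at hi
    obtain ⟨hi0, _⟩ := hi
    refine ⟨i.toNat, ?_⟩
    have hsl : (PySem.Str.slice ele (some i) (some (i + 3))).toList
        = PySem.List.slice ele.toList (some i) (some (i + 3)) := by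
      simp [PySem.Str.slice]
    have h2 : e.toList = List.take ((i+3).toNat - i.toNat) (List.drop i.toNat ele.toList) := by
      rw [he, hsl, PySem.List.slice_toNat _ hi0 (by omega)]
    rw [h2]
    exact List.take_prefix _ _

-- membership in B's set, unfolded to the two sources
theorem pv_mem_seenB (row_json : List (String × List String)) (x : String) :
    x ∈ pvSeenB row_json ↔
      ((∃ field ∈ row_json, ∃ ele ∈ PySem.Dict.getD (PySem.Dict.mk row_json) field.1 [],
          ∃ i ∈ PySem.List.pyRange 0 (PySem.Str.len ele - 2) 1,
            x = PySem.Str.slice ele (some i) (some (i + 3)))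
        ∨ x ∈ PySem.Dict.getD (PySem.Dict.mk row_json) "By investment category" []) := by
  unfold pvSeenB pvSubs
  rw [PySem.Set.mem_union]
  simp [PySem.Set.mem_ofList, List.mem_flatMap, eq_comm]

-- A's per-currency test agrees with membership in B's set (for 3-character patterns)
theorem pv_pred_iff (row_json : List (String × List String)) (e : String) (h3 : e.toList.length = 3) :
    (e ∈ PySem.Dict.getD (PySem.Dict.mk row_json) "By investment category" []
      ∨ pvACellHit e row_json = true) ↔ e ∈ pvSeenB row_json := by
  rw [pv_mem_seenB]
  unfold pvACellHit
  simp only [List.any_eq_true]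
  constructor
  · rintro (hb | ⟨f, hf, ele, he, hin⟩)
    · exact Or.inr hb
    · exact Or.inl ⟨f, hf, ele, he, (pv_isIn_iff_slice e ele h3).mp hin⟩
  · rintro (⟨f, hf, ele, he, hsl⟩ | hb)
    · exact Or.inr ⟨f, hf, ele, he, (pv_isIn_iff_slice e ele h3).mpr hsl⟩
    · exact Or.inl hb

-- A's early-return loop equals B's find? over the same currency list
theorem pv_loop_eq (row_json : List (String × List String)) (cs : List String)
    (H : ∀ e ∈ cs, (e ∈ PySem.Dict.getD (PySem.Dict.mk row_json) "By investment category" []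
      ∨ pvACellHit e row_json = true) ↔ e ∈ pvSeenB row_json) :
    pvALoop row_json cs = (cs.find? (fun e => PySem.Set.contains (pvSeenB row_json) e)).getD "" := by
  induction cs with
  | nil => rfl
  | cons e t ih =>
    have he := H e (List.mem_cons_self ..)
    have ht := ih (fun x hx => H x (List.mem_cons_of_mem _ hx))
    rw [pvALoop]
    by_cases hb : e ∈ PySem.Dict.getD (PySem.Dict.mk row_json) "By investment category" []
    · rw [if_pos (List.contains_iff_mem.mpr hb),
        List.find?_cons_of_pos
          (show PySem.Set.contains (pvSeenB row_json) e = true from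
            (PySem.Set.contains_iff _ _).mpr (he.mp (Or.inl hb))),
        Option.getD_some]
    · by_cases hc : pvACellHit e row_json = true
      · rw [if_neg (fun h => hb (List.contains_iff_mem.mp h)), if_pos hc,
          List.find?_cons_of_pos
            (show PySem.Set.contains (pvSeenB row_json) e = true from
              (PySem.Set.contains_iff _ _).mpr (he.mp (Or.inr hc))),
          Option.getD_some]
      · have hns : ¬ e ∈ pvSeenB row_json := fun h => by
          rcases he.mpr h with h1 | h2
          · exact hb h1
          · exact hc h2
        rw [if_neg (fun h => hb (List.contains_iff_mem.mp h)), if_neg hc,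
          List.find?_cons_of_neg
            (show ¬ PySem.Set.contains (pvSeenB row_json) e = true from fun h =>
              hns ((PySem.Set.contains_iff _ _).mp h)),
          ht]

-- ===== VERDICT (by name: the statement is the Claim_ definition above) =====
theorem get_currency_position_spec : Claim_equal_get_currency_position := by
  intro row_json _
  unfold Spec_get_currency_position get_currency_position get_currency_position_alt
  rw [pv_split_codes]
  exact pv_loop_eq row_json pvCurrencies (fun e he => pv_pred_iff row_json e (pv_cur_len e he))
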